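-- pv_equiv track=rewrite | github.com/gouveiafabio98/Shapeshifter | addon/shapeshifter/combination.py | index_distance
-- ===== SOURCE A (Python) =====
-- def index_distance(i1, i2, len):
--     if i1>len or i2>len:
--         return -1
--     dist = 0
--     pointer = i1
--     while pointer != i2:
--         pointer += 1
--         if pointer == len:
--             pointer = 0
--         dist += 1
--     return dist
-- ===== SOURCE B (Python) =====
-- def index_distance(i1, i2, len):
--     if i1 > len or i2 > len:
--         return -1
--     return (i2 - i1) % len
-- ===== Notes on version B (the rewrite author's own statement) =====
-- stated objective: simpler
-- what changed: Replaced the step-by-step circular walk (increment pointer, wrap at len, count steps) with the closed form (i2 - i1) % len behind the same -1 guard.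
-- outside the precondition, e.g. on index_distance(-3, 2, 5): A returns 5, B returns 0; on index_distance(-2, -1, 0): A returns 1, B raises ZeroDivisionError; on index_distance(-5, -3, -1): A returns 2, B returns 0
import Mathlib
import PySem

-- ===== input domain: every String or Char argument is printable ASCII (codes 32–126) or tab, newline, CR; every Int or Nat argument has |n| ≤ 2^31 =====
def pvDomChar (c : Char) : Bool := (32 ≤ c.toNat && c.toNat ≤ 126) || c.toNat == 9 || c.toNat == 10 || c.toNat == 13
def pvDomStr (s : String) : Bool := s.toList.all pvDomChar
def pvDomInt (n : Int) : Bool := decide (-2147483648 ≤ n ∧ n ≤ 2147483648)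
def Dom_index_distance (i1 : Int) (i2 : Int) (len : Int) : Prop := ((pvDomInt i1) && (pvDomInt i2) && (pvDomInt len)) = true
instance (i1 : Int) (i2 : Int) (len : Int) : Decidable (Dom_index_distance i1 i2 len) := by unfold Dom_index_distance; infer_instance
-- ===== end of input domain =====

-- ===== PORT A =====
-- B replaces A's step-by-step pointer walk with the closed form (i2 - i1) % len behind the same -1 guard.
-- fuel-bounded transcription of A's while loop; inside Pre_ the loop runs at most len-1 < len.toNat times
def idLoop (fuel : Nat) (pointer : Int) (i2 : Int) (dist : Int) (len : Int) : Int :=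
  match fuel with
  | 0 => dist
  | fuel + 1 =>
    if pointer ≠ i2 then
      let p := pointer + 1
      let p := if p = len then 0 else p
      idLoop fuel p i2 (dist + 1) len
    else dist

def index_distance (i1 : Int) (i2 : Int) (len : Int) : Int :=
  if i1 > len ∨ i2 > len then -1
  else idLoop ((i2 - i1).toNat + len.toNat + 1) i1 i2 0 len

-- ===== PORT B =====
def index_distance_alt (i1 : Int) (i2 : Int) (len : Int) : Int :=
  if i1 > len ∨ i2 > len then -1
  else PySem.Int.mod (i2 - i1) len

-- ===== PRECONDITION & SPEC =====
-- Pre_ excludes the inputs on which A diverges (i2 = len ≠ i1, i1 = len > i2, negative targets,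
-- len ≤ 0 cycles), the len = 0 inputs not caught by the guard where B's modulo raises, and the
-- out-of-range index pairs whose walk is ≥ len or has len < 0 — corners outside any valid circular
-- indexing, where no circular distance is specified and A's raw walk length and B's modulo are two
-- equally defensible choices (e.g. (-3, 2, 5): A returns 5, B returns 0; (-5, -3, -1): A 2, B 0).
def Pre_index_distance (i1 : Int) (i2 : Int) (len : Int) : Prop :=
  (i1 > len ∨ i2 > len) ∨
    (0 < len ∧ ((i1 = i2 ∧ i2 ≤ len) ∨ (i1 ≤ i2 ∧ i2 < len ∧ i2 - i1 < len) ∨ (0 ≤ i2 ∧ i2 < i1 ∧ i1 < len)))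
instance (i1 : Int) (i2 : Int) (len : Int) : Decidable (Pre_index_distance i1 i2 len) := by unfold Pre_index_distance; infer_instance
def pvWitness_index_distance : Int × Int × Int := (3, 1, 5)
def Spec_index_distance (i1 : Int) (i2 : Int) (len : Int) (out : Int) : Prop := out = index_distance_alt i1 i2 len
instance (i1 : Int) (i2 : Int) (len : Int) (out : Int) : Decidable (Spec_index_distance i1 i2 len out) := by unfold Spec_index_distance; infer_instance

-- ===== CLAIM (what is proved, stated in full; the proofs are below) =====
def Claim_equal_index_distance : Prop := ∀ (i1 : Int) (i2 : Int) (len : Int), Dom_index_distance i1 i2 len → Pre_index_distance i1 i2 len → Spec_index_distance i1 i2 len (index_distance i1 i2 len)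

-- ===== LEMMAS AND PROOFS =====

-- loop invariant: with both indices in range, the loop adds exactly the forward circular distance
theorem idLoop_eq (len i2 : Int) (h2 : 0 ≤ i2 ∧ i2 < len) :
    ∀ (k : Nat) (fuel : Nat) (pointer dist : Int), 0 ≤ pointer → pointer < len →
    (k : Int) = (if pointer ≤ i2 then i2 - pointer else len - pointer + i2) →
    k ≤ fuel → idLoop fuel pointer i2 dist len = dist + k := by
  intro k
  induction k with
  | zero =>
    intro fuel pointer dist hp0 hpl hk _
    have hpe : pointer = i2 := by split at hk <;> omega
    cases fuel with
    | zero => simp [idLoop]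
    | succ f => simp [idLoop, hpe]
  | succ k ih =>
    intro fuel pointer dist hp0 hpl hk hfuel
    have hne : pointer ≠ i2 := by split at hk <;> omega
    cases fuel with
    | zero => omega
    | succ f =>
      simp only [idLoop, if_pos hne]
      by_cases hw : pointer + 1 = len
      · rw [if_pos hw]
        have := ih f 0 (dist + 1) (by omega) (by omega) (by split <;> omega) (by omega)
        rw [this]; push_cast; ring
      · rw [if_neg hw]
        have := ih f (pointer + 1) (dist + 1) (by omega) (by omega) (by split <;> split at hk <;> omega) (by omega)
        rw [this]; push_cast; ring

-- loop stops immediately when the pointer already equals the target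
theorem idLoop_stop (fuel : Nat) (p dist len : Int) : idLoop fuel p p dist len = dist := by
  cases fuel <;> simp [idLoop]

-- plain climb: target ahead and below len, no wrap happens
theorem idLoop_climb (len i2 : Int) (h2 : i2 < len) :
    ∀ (k : Nat) (fuel : Nat) (pointer dist : Int),
    (k : Int) = i2 - pointer → k ≤ fuel → idLoop fuel pointer i2 dist len = dist + k := by
  intro k
  induction k with
  | zero =>
    intro fuel pointer dist hk _
    have : pointer = i2 := by omega
    subst this; simp [idLoop_stop]
  | succ k ih =>
    intro fuel pointer dist hk hfuel
    have hne : pointer ≠ i2 := by omega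
    cases fuel with
    | zero => omega
    | succ f =>
      simp only [idLoop, if_pos hne]
      rw [if_neg (by omega)]
      rw [ih f (pointer + 1) (dist + 1) (by omega) (by omega)]
      push_cast; ring

theorem index_distance_spec : Claim_equal_index_distance := by
  intro i1 i2 len _ hpre
  unfold Spec_index_distance index_distance index_distance_alt
  by_cases hg : i1 > len ∨ i2 > len
  · simp [hg]
  · simp only [if_neg hg]
    rcases hpre with h | ⟨hlen, hcase⟩
    · exact absurd h hg
    have hm : PySem.Int.mod (i2 - i1) len = (i2 - i1) % len := PySem.Int.mod_eq_emod_of_pos hlen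
    rw [hm]
    rcases hcase with ⟨heq, _⟩ | ⟨hle, h2l, hd⟩ | ⟨h20, hlt, h1l⟩
    · subst heq
      rw [idLoop_stop]; simp
    · -- forward climb of length i2 - i1 < len
      rw [idLoop_climb len i2 h2l (i2 - i1).toNat _ i1 0
        (by rw [Int.toNat_of_nonneg (by omega)]) (by omega)]
      rw [Int.toNat_of_nonneg (by omega), zero_add,
        Int.emod_eq_of_lt (by omega) (by omega)]
    · -- wrap: walk of length len - i1 + i2
      set k : Int := len - i1 + i2 with hkdef
      rw [idLoop_eq len i2 ⟨h20, by omega⟩ k.toNat _ i1 0 (by omega) h1l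
        (by rw [Int.toNat_of_nonneg (by omega)]; rw [if_neg (by omega)]) (by omega)]
      rw [Int.toNat_of_nonneg (by omega), zero_add]
      have h1 : (i2 - i1) % len = (i2 - i1 + len * 1) % len := (Int.add_mul_emod_self_left (i2 - i1) len 1).symm
      rw [h1, Int.emod_eq_of_lt (by omega) (by omega)]
      omega
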